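-- pv_equiv track=rewrite | github.com/carmenmaiella/interactive_network | src/complex_merged.py | formatting_labels
-- ===== SOURCE A (Python) =====
-- def formatting_labels(s):
--     parts = s.split(" ")
--     result = [parts[0]]
--     temp_list = []
--
--     for part in parts[1:]:
--         temp_list.append(part[:-1])
--     for i in range(len(temp_list)-1):
--         if i%2 == 0:
--             temp_list[i]=temp_list[i].strip("(")
--             if temp_list[i] == temp_list[i+1]:
--                 result.append(f"({temp_list[i] })")
--             else:
--                 result.append(f"({temp_list[i]}-{temp_list[i+1]})")
--     return " ".join(result)
-- ===== SOURCE B (Python) =====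
-- def formatting_labels(s):
--     parts = s.split(" ")
--     rest = parts[1:]
--     if len(rest) % 2 == 1:
--         rest.pop()
--     acc = ""
--     while rest:
--         b = rest.pop()[:-1]
--         a = rest.pop()[:-1].strip("(")
--         piece = f"({a})" if a == b else f"({a}-{b})"
--         acc = " " + piece + acc
--     return parts[0] + acc
-- ===== Notes on version B (the rewrite author's own statement) =====
-- stated objective: alternative
-- what changed: A makes two staged left-to-right passes (build a trimmed list, then a range(len-1) index loop with an i%2==0 parity test that mutates the list in place and appends pieces to a result list joined at the end); B is a single right-to-left while loop that pops two raw tokens at a time off the tail and prepends each formatted piece to a string accumulator - no index arithmetic, no parity test, no trimmed list, no result list and no join.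
import Mathlib
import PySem

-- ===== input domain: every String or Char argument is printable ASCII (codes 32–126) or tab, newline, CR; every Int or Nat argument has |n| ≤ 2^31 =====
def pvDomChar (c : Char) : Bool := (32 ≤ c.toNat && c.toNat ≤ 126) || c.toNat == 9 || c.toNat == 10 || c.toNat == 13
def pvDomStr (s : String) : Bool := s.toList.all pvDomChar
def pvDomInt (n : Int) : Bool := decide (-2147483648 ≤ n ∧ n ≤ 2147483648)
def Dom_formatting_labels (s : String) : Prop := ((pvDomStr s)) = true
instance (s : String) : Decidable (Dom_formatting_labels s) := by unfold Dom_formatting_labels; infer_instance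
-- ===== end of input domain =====

-- B replaces A's two staged passes (pre-trim list, then a range(len-1) index loop with an i % 2
-- test and in-place mutation) by a single right-to-left while loop that pops two raw tokens at a
-- time and prepends each formatted piece to a string accumulator: same output, no index
-- arithmetic, no parity test, no intermediate trimmed list and no join.

-- ===== PORT A =====
-- the body of A's index loop, carrying (temp_list, result) as state
def pvBodyA (st : List String × List String) (i : Int) : List String × List String :=
  if PySem.Int.mod i 2 == 0 then
    let tl := PySem.List.pySetD st.1 i
      (PySem.Str.stripChars (PySem.List.pyGetD st.1 i "") "(")
    if PySem.List.pyGetD tl i "" == PySem.List.pyGetD tl (i + 1) "" then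
      (tl, st.2 ++ ["(" ++ PySem.List.pyGetD tl i "" ++ ")"])
    else
      (tl, st.2 ++ ["(" ++ PySem.List.pyGetD tl i "" ++ "-" ++ PySem.List.pyGetD tl (i + 1) "" ++ ")"])
  else st

def formatting_labels (s : String) : String :=
  let parts := (PySem.Str.split? s " ").getD []   -- s.split(" "); sep ≠ "" so split? is always some
  let result := [PySem.List.pyGetD parts 0 ""]
  let temp_list : List String :=
    (PySem.List.slice parts (some 1) none).foldl
      (fun acc p => acc ++ [PySem.Str.slice p none (some (-1))]) []
  let st := (PySem.List.pyRange 0 ((temp_list.length : Int) - 1) 1).foldl pvBodyA (temp_list, result)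
  PySem.Str.join " " st.2

-- ===== PORT B =====
-- the while loop: pop the last two raw tokens, format, prepend to the accumulator.
-- (rest always has even length when called from formatting_labels_alt, so the getD "" defaults
-- that make the Lean recursion total are never consulted.)
def pvLoopB : List String → String → String
  | [], acc => acc
  | p :: t, acc =>
      let b := PySem.Str.slice ((p :: t).getLast?.getD "") none (some (-1))   -- b = rest.pop()[:-1]
      let r1 := (p :: t).dropLast
      let a := PySem.Str.stripChars
        (PySem.Str.slice (r1.getLast?.getD "") none (some (-1))) "("      -- a = rest.pop()[:-1].strip("(")
      let r2 := r1.dropLast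
      pvLoopB r2
        (" " ++ (if a == b then "(" ++ a ++ ")" else "(" ++ a ++ "-" ++ b ++ ")") ++ acc)
termination_by r _ => r.length
decreasing_by simp [List.length_dropLast]

def formatting_labels_alt (s : String) : String :=
  let parts := (PySem.Str.split? s " ").getD []
  let rest := PySem.List.slice parts (some 1) none              -- rest = parts[1:]
  let rest := if rest.length % 2 == 1 then rest.dropLast else rest   -- drop the unpaired tail token
  PySem.List.pyGetD parts 0 "" ++ pvLoopB rest ""

-- ===== PRECONDITION & SPEC =====
def Spec_formatting_labels (s : String) (out : String) : Prop := out = formatting_labels_alt s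
instance (s : String) (out : String) : Decidable (Spec_formatting_labels s out) := by unfold Spec_formatting_labels; infer_instance

-- ===== CLAIM (what is proved, stated in full; the proofs are below) =====
def Claim_equal_formatting_labels : Prop := ∀ (s : String), Dom_formatting_labels s → Spec_formatting_labels s (formatting_labels s)

-- ===== LEMMAS AND PROOFS =====

-- proof-only vocabulary: the trim p[:-1], one formatted pair, and A's pair list / B's pair string
def pvTrim (p : String) : String := PySem.Str.slice p none (some (-1))

def pvPieceRaw (x y : String) : String :=
  let b := pvTrim y
  let a := PySem.Str.stripChars (pvTrim x) "("
  if a == b then "(" ++ a ++ ")" else "(" ++ a ++ "-" ++ b ++ ")"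

-- the pieces A appends, as a function of the TRIMMED list
def pvPairs : List String → List String
  | a :: b :: rest =>
      let a' := PySem.Str.stripChars a "("
      (if a' == b then "(" ++ a' ++ ")" else "(" ++ a' ++ "-" ++ b ++ ")") :: pvPairs rest
  | _ => []

-- the pieces B prepends, as one string over the RAW tokens
def pvG : List String → String
  | x :: y :: t => " " ++ pvPieceRaw x y ++ pvG t
  | _ => ""

-- join with " " of a head plus A's pieces equals the head plus B's pair string
theorem pvJoin_cons_cons (a b : String) (t : List String) :
    PySem.Str.join " " (a :: b :: t) = a ++ " " ++ PySem.Str.join " " (b :: t) := by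
  apply String.toList_inj.mp
  simp [PySem.Str.toList_join, PySem.Chars.join_cons_cons]

theorem pvJoin_singleton (a : String) : PySem.Str.join " " [a] = a := by
  simp [PySem.Str.join, PySem.Chars.join, List.intercalate]

-- loop invariant: from an even index k with tl.drop k = rest, A's loop appends exactly pvPairs rest
theorem pvLoopA_eq : ∀ (rest tl res : List String) (k : Nat),
    tl.drop k = rest → k % 2 = 0 →
    ((PySem.List.pyRange (k : Int) ((tl.length : Int) - 1) 1).foldl pvBodyA (tl, res)).2
      = res ++ pvPairs rest
  | a :: b :: rest2, tl, res, k, hdrop, hk => by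
    have hlen : tl.length = k + 2 + rest2.length := by
      have h := congrArg List.length hdrop
      simp [List.length_drop] at h
      omega
    have hka : tl[k]? = some a := by
      have h : (List.drop k tl)[0]? = some a := by rw [hdrop]; rfl
      simpa using h
    have hkb : tl[k + 1]? = some b := by
      have h : (List.drop k tl)[1]? = some b := by rw [hdrop]; rfl
      simpa using h
    have hmodk : PySem.Int.mod (k : Int) 2 = 0 := by
      have h2 : PySem.Int.mod (k : Int) ((2 : Nat) : Int) = ((k % 2 : Nat) : Int) :=
        PySem.Int.mod_natCast k 2
      rw [hk] at h2
      exact_mod_cast h2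
    have hmodk1 : PySem.Int.mod ((k : Int) + 1) 2 = 1 := by
      have h2 : PySem.Int.mod (((k + 1 : Nat) : Int)) ((2 : Nat) : Int) = (((k + 1) % 2 : Nat) : Int) :=
        PySem.Int.mod_natCast (k + 1) 2
      have hodd : (k + 1) % 2 = 1 := by omega
      rw [hodd] at h2
      push_cast at h2 ⊢
      exact h2
    set a' := PySem.Str.stripChars a "(" with ha'
    have hset : PySem.List.pySetD tl (k : Int) (PySem.Str.stripChars (PySem.List.pyGetD tl (k : Int) "") "(") = tl.set k a' := by
      simp [PySem.List.pyGetD_natCast, List.getD, hka, ha']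
    have hget1 : PySem.List.pyGetD (tl.set k a') (k : Int) "" = a' := by
      have hk' : k < tl.length := by omega
      simp [PySem.List.pyGetD_natCast, List.getD, hk']
    have hget2 : PySem.List.pyGetD (tl.set k a') ((k : Int) + 1) "" = b := by
      have hc : ((k : Int) + 1) = ((k + 1 : Nat) : Int) := by push_cast; ring
      rw [hc, PySem.List.pyGetD_natCast, List.getD_eq_getElem?_getD,
        List.getElem?_set_ne (by omega : k ≠ k + 1), hkb]
      rfl
    have hcons : PySem.List.pyRange (k : Int) ((tl.length : Int) - 1) 1
        = (k : Int) :: PySem.List.pyRange ((k : Int) + 1) ((tl.length : Int) - 1) 1 := by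
      apply PySem.List.pyRange_one_cons
      omega
    rw [hcons, List.foldl_cons]
    have hbody1 : pvBodyA (tl, res) (k : Int)
        = (tl.set k a', res ++ [if a' == b then "(" ++ a' ++ ")" else "(" ++ a' ++ "-" ++ b ++ ")"]) := by
      simp only [pvBodyA, hmodk]
      simp only [hset, hget1, hget2]
      by_cases hab : a' == b <;> simp [hab]
    rw [hbody1]
    have hpp : pvPairs (a :: b :: rest2)
        = (if a' == b then "(" ++ a' ++ ")" else "(" ++ a' ++ "-" ++ b ++ ")") :: pvPairs rest2 := by
      simp [pvPairs, ha']
    rcases rest2 with _ | ⟨c, rest3⟩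
    · have hnil : PySem.List.pyRange ((k : Int) + 1) ((tl.length : Int) - 1) 1 = [] := by
        apply PySem.List.pyRange_one_eq_nil
        simp at hlen
        omega
      rw [hnil]
      simp [pvPairs, ha']
    · have hcons2 : PySem.List.pyRange ((k : Int) + 1) ((tl.length : Int) - 1) 1
          = ((k : Int) + 1) :: PySem.List.pyRange ((k : Int) + 2) ((tl.length : Int) - 1) 1 := by
        have := PySem.List.pyRange_one_cons
          (a := (k : Int) + 1) (b := ((tl.length : Int) - 1))
          (by simp at hlen; omega)
        simpa [add_assoc] using this
      rw [hcons2, List.foldl_cons]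
      have hbody2 : pvBodyA (tl.set k a', res ++ [if a' == b then "(" ++ a' ++ ")" else "(" ++ a' ++ "-" ++ b ++ ")"]) ((k : Int) + 1)
          = (tl.set k a', res ++ [if a' == b then "(" ++ a' ++ ")" else "(" ++ a' ++ "-" ++ b ++ ")"]) := by
        simp only [pvBodyA, hmodk1]
        norm_num
      rw [hbody2]
      have hdrop2 : (tl.set k a').drop (k + 2) = c :: rest3 := by
        rw [List.drop_set, if_pos (by omega : k < k + 2)]
        have h := congrArg (List.drop 2) hdrop
        simpa [List.drop_drop, Nat.add_comm] using h
      have hcast : ((k : Int) + 2) = ((k + 2 : Nat) : Int) := by push_cast; ring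
      have hlen2 : ((tl.set k a').length : Int) = (tl.length : Int) := by
        simp
      have := pvLoopA_eq (c :: rest3) (tl.set k a')
        (res ++ [if a' == b then "(" ++ a' ++ ")" else "(" ++ a' ++ "-" ++ b ++ ")"])
        (k + 2) hdrop2 (by omega)
      rw [hcast, ← hlen2]
      rw [this]
      simp [hpp]
  | [], tl, res, k, hdrop, hk => by
    have hnil : PySem.List.pyRange (k : Int) ((tl.length : Int) - 1) 1 = [] := by
      apply PySem.List.pyRange_one_eq_nil
      have : tl.length ≤ k := by
        have h := congrArg List.length hdrop
        simp [List.length_drop] at h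
        omega
      omega
    rw [hnil]
    simp [pvPairs]
  | [a], tl, res, k, hdrop, hk => by
    have hnil : PySem.List.pyRange (k : Int) ((tl.length : Int) - 1) 1 = [] := by
      apply PySem.List.pyRange_one_eq_nil
      have h := congrArg List.length hdrop
      simp [List.length_drop] at h
      omega
    rw [hnil]
    simp [pvPairs]

-- B's loop takes one step: popping the two rightmost tokens prepends their piece
theorem pvLoopB_snoc (e : List String) (x y : String) (acc : String) :
    pvLoopB (e ++ [x, y]) acc = pvLoopB e (" " ++ pvPieceRaw x y ++ acc) := by
  rw [pvLoopB.eq_def]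
  cases e with
  | nil =>
      simp [pvPieceRaw, pvTrim]
  | cons a t =>
      have h1 : ((a :: t) ++ [x, y]).getLast? = some y := by
        have : (a :: t) ++ [x, y] = ((a :: t) ++ [x]) ++ [y] := by simp
        rw [this, List.getLast?_concat]
      have h2 : ((a :: t) ++ [x, y]).dropLast = (a :: t) ++ [x] := by
        have : (a :: t) ++ [x, y] = ((a :: t) ++ [x]) ++ [y] := by simp
        rw [this, List.dropLast_concat]
      have h3 : (a :: (t ++ [x])).getLast? = some x := by
        rw [show a :: (t ++ [x]) = (a :: t) ++ [x] by simp, List.getLast?_concat]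
      have h4 : (a :: (t ++ [x])).dropLast = a :: t := by
        rw [show a :: (t ++ [x]) = (a :: t) ++ [x] by simp, List.dropLast_concat]
      simp only [List.cons_append] at h1 h2 ⊢
      simp [h1, h2, h3, h4, pvPieceRaw, pvTrim]

-- appending a pair on the right appends its piece to pvG (for even-length prefixes)
theorem pvG_snoc : ∀ (e : List String), e.length % 2 = 0 → ∀ (x y : String),
    pvG (e ++ [x, y]) = pvG e ++ (" " ++ pvPieceRaw x y)
  | [], _, x, y => by simp [pvG]
  | [a], h, x, y => by simp at h
  | a :: b :: t, h, x, y => by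
      have ht : t.length % 2 = 0 := by simp at h; omega
      simp only [List.cons_append, pvG, pvG_snoc t ht x y]
      simp [String.append_assoc]

-- characterisation of B's loop on even-length token lists
theorem pvLoopB_eq : ∀ (n : Nat) (r : List String), r.length = n → n % 2 = 0 →
    ∀ acc, pvLoopB r acc = pvG r ++ acc := by
  intro n
  induction n using Nat.strong_induction_on with
  | _ n IH =>
    intro r hlen hev acc
    cases r with
    | nil => simp [pvLoopB, pvG]
    | cons a l =>
      have hne : (a :: l) ≠ [] := by simp
      have hlenr : (a :: l).length = n := hlen
      have hn2 : 2 ≤ n := by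
        rcases l with _ | ⟨b, t⟩
        · simp at hlenr; omega
        · simp at hlenr; omega
      set i := (a :: l).dropLast with hi
      have hine : i ≠ [] := by
        have : i.length = n - 1 := by rw [hi, List.length_dropLast, hlenr]
        intro hcon; rw [hcon] at this; simp at this; omega
      have hr : i ++ [(a :: l).getLast hne] = a :: l := List.dropLast_append_getLast hne
      have hi2 : i.dropLast ++ [i.getLast hine] = i := List.dropLast_append_getLast hine
      set e := i.dropLast with he
      set x := i.getLast hine
      set y := (a :: l).getLast hne
      have hre : e ++ [x, y] = a :: l := by
        rw [← hr, ← hi2]; simp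
      have helen : e.length = n - 2 := by
        rw [he, List.length_dropLast, hi, List.length_dropLast, hlenr]
        omega
      rw [← hre, pvLoopB_snoc,
        IH (n - 2) (by omega) e helen (by omega),
        pvG_snoc e (by rw [helen]; omega) x y]
      simp [String.append_assoc]

-- pvPairs ignores a trailing unpaired token
theorem pvPairs_snoc : ∀ (t : List String), t.length % 2 = 0 → ∀ (z : String),
    pvPairs (t ++ [z]) = pvPairs t
  | [], _, z => by simp [pvPairs]
  | [a], h, z => by simp at h
  | a :: b :: t, h, z => by
      have ht : t.length % 2 = 0 := by simp at h; omega
      simp only [List.cons_append, pvPairs, pvPairs_snoc t ht z]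

-- joining A's head and pieces equals the head followed by B's pair string (even token lists)
theorem pvJoin_pairs : ∀ (r : List String), r.length % 2 = 0 → ∀ (p0 : String),
    PySem.Str.join " " (p0 :: pvPairs (r.map pvTrim)) = p0 ++ pvG r
  | [], _, p0 => by simp [pvPairs, pvG, pvJoin_singleton]
  | [a], h, p0 => by simp at h
  | a :: b :: t, h, p0 => by
      have ht : t.length % 2 = 0 := by simp at h; omega
      have hstep := pvJoin_pairs t ht
        (if PySem.Str.stripChars (pvTrim a) "(" == pvTrim b
         then "(" ++ PySem.Str.stripChars (pvTrim a) "(" ++ ")"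
         else "(" ++ PySem.Str.stripChars (pvTrim a) "(" ++ "-" ++ pvTrim b ++ ")")
      simp only [List.map_cons, pvPairs, pvG, pvPieceRaw]
      rw [pvJoin_cons_cons, hstep]
      by_cases hab : PySem.Str.stripChars (pvTrim a) "(" == pvTrim b <;>
        simp [hab, String.append_assoc]

-- ===== VERDICT (by name: the statement is the Claim_ definition above) =====
theorem formatting_labels_spec : Claim_equal_formatting_labels := by
  intro s _
  unfold Spec_formatting_labels formatting_labels formatting_labels_alt
  set parts := (PySem.Str.split? s " ").getD [] with hparts
  have hslice : PySem.List.slice parts (some 1) none = parts.drop 1 := by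
    have := PySem.List.slice_from (xs := parts) (a := (1 : Int)) (by norm_num)
    simpa using this
  have hmap : (PySem.List.slice parts (some 1) none).foldl
      (fun acc p => acc ++ [PySem.Str.slice p none (some (-1))]) []
      = (parts.drop 1).map pvTrim := by
    rw [hslice, PySem.List.foldl_append_singleton_eq_map]
    rfl
  simp only [hmap]
  simp only [hslice]
  set r := parts.drop 1 with hr
  have hA : ((PySem.List.pyRange 0 (((r.map pvTrim).length : Int) - 1) 1).foldl pvBodyA
      (r.map pvTrim, [PySem.List.pyGetD parts 0 ""])).2
      = [PySem.List.pyGetD parts 0 ""] ++ pvPairs (r.map pvTrim) := by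
    exact pvLoopA_eq (r.map pvTrim) (r.map pvTrim) _ 0 rfl rfl
  rw [hA]
  by_cases hodd : r.length % 2 = 1
  · have hbeq : (r.length % 2 == 1) = true := by simp [hodd]
    rw [if_pos hbeq]
    have hne : r ≠ [] := by
      intro hcon; rw [hcon] at hodd; simp at hodd
    have hdec : r.dropLast ++ [r.getLast hne] = r := List.dropLast_append_getLast hne
    have helen : r.dropLast.length % 2 = 0 := by
      rw [List.length_dropLast]; omega
    have hmaps : r.map pvTrim = r.dropLast.map pvTrim ++ [pvTrim (r.getLast hne)] := by
      conv_lhs => rw [← hdec]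
      simp
    rw [hmaps, pvPairs_snoc (r.dropLast.map pvTrim) (by simpa using helen) _]
    have := pvJoin_pairs r.dropLast helen (PySem.List.pyGetD parts 0 "")
    rw [show ([PySem.List.pyGetD parts 0 ""] ++ pvPairs (r.dropLast.map pvTrim))
        = PySem.List.pyGetD parts 0 "" :: pvPairs (r.dropLast.map pvTrim) by simp, this,
      pvLoopB_eq r.dropLast.length r.dropLast rfl helen ""]
    simp
  · have hev : r.length % 2 = 0 := by omega
    rw [if_neg (by simp [hev])]
    rw [show ([PySem.List.pyGetD parts 0 ""] ++ pvPairs (r.map pvTrim))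
        = PySem.List.pyGetD parts 0 "" :: pvPairs (r.map pvTrim) by simp,
      pvJoin_pairs r hev (PySem.List.pyGetD parts 0 ""),
      pvLoopB_eq r.length r rfl hev ""]
    simp
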